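-- pv_equiv track=rewrite | github.com/aerimforest/Algorithm-Study | Baekjoon/donggeun/이차원 배열과 연산.py | c_cal
-- ===== SOURCE A (Python) =====
-- from collections import Counter
--
-- def zero_padding(arr: list[list]):
--     n = len(arr)
--     max_idx = max([len(arr[i]) for i in range(n)])
--     for i in range(n):
--         arr[i].extend([0]*(max_idx - len(arr[i])))
--     return arr
--
-- def reversing(arr: list[list]) -> list[list]:
--     n = len(arr)
--     m = len(arr[0])
--     res = [[0]*n for _ in range(m)]
--     for i in range(n):
--         for j in range(m):
--             res[j][i] = arr[i][j]
--     return res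
--
-- def c_cal(arr: list[list]) -> list[list]:
--     n = len(arr)
--     m = len(arr[0])
--     res = []
--     for i in range(m):
--         tmp = Counter([arr[j][i] for j in range(n)])
--         tmp = sorted([(num,cnt) for num, cnt in tmp.items()], key=lambda x:(x[1],x[0]))
--         sorted_tmp = []
--         for num, cnt in tmp:
--             if num != 0:
--                 sorted_tmp.append(num)
--                 sorted_tmp.append(cnt)
--         res.append(sorted_tmp)
--
--     res = zero_padding(res)
--     return reversing(res)
-- ===== SOURCE B (Python) =====
-- def c_cal(arr: list[list]) -> list[list]:
--     # Stage 1: sort each column and run-length encode it (no Counter/dict),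
--     # keeping nonzero values as (count, value) pairs, then sort pairs lexicographically.
--     res = []
--     for col in zip(*arr):
--         s = sorted(col)
--         n = len(s)
--         pairs = []
--         i = 0
--         while i < n:
--             j = i
--             while j < n and s[j] == s[i]:
--                 j += 1
--             if s[i] != 0:
--                 pairs.append((j - i, s[i]))
--             i = j
--         pairs.sort()
--         res.append([x for cnt, v in pairs for x in (v, cnt)])
--     # Stage 2: transpose with zero-padding by peeling heads off the ragged rows
--     # until every row is exhausted (no max/padding/index arithmetic).
--     out = []
--     while any(res):
--         out.append([c[0] if c else 0 for c in res])
--         res = [c[1:] for c in res]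
--     return out
-- ===== Notes on version B (the rewrite author's own statement) =====
-- stated objective: alternative
-- what changed: B replaces the per-column Counter/hash counting by sort-then-run-length-encode (sort each column, scan runs with two indices to get (count,value) pairs, then sort the pairs), and replaces the zero-padding plus index-based transpose by a peeling loop that repeatedly emits the heads of the ragged rows until all are exhausted.
import Mathlib
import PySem

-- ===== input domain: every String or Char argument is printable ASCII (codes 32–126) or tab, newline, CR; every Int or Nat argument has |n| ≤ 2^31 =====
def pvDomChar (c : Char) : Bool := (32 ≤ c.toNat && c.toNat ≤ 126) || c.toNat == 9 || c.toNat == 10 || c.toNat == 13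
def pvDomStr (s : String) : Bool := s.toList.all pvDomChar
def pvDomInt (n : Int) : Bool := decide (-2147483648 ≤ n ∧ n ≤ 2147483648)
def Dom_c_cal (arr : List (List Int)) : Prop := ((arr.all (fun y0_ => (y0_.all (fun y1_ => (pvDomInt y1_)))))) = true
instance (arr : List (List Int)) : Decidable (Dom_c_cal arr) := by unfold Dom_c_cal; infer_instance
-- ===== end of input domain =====

-- B counts each column by sorting it and run-length-encoding the runs (no Counter/dict)
-- and transposes the ragged result by peeling heads until all rows are exhausted
-- (no padding, no max, no index arithmetic); objective: alternative decomposition.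
-- A mutates only its local `res` list; neither version mutates the caller's argument.

-- ===== PORT A =====
-- helper zero_padding: 'arr[i].extend(...)' mutates row i in place, ported as a set-fold over range(n)
def zeroPadding (arr : List (List Int)) : List (List Int) :=
  let n : Int := arr.length
  match PySem.List.max? ((PySem.List.pyRange 0 n 1).map (fun i => ((PySem.List.pyGetD arr i []).length : Int))) (fun x => x) with
  | none => []   -- max([]) raises ValueError: such inputs are excluded by Pre_c_cal
  | some maxIdx =>
      (PySem.List.pyRange 0 n 1).foldl
        (fun a i => a.set i.toNat (PySem.List.pyGetD a i [] ++ List.replicate (maxIdx - ((PySem.List.pyGetD a i []).length : Int)).toNat 0)) arr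

-- helper reversing: 'res[j][i] = arr[i][j]' is an in-place matrix assignment, ported as nested set-folds
def reversing (arr : List (List Int)) : List (List Int) :=
  let n : Int := arr.length
  let m : Int := ((PySem.List.pyGetD arr 0 []).length : Int)
  (PySem.List.pyRange 0 n 1).foldl
    (fun a i => (PySem.List.pyRange 0 m 1).foldl
        (fun a j => a.set j.toNat ((PySem.List.pyGetD a j []).set i.toNat (PySem.List.pyGetD (PySem.List.pyGetD arr i []) j 0))) a)
    (List.replicate m.toNat (List.replicate n.toNat (0:Int)))

def c_cal (arr : List (List Int)) : List (List Int) :=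
  let n : Int := arr.length
  let m : Int := ((PySem.List.pyGetD arr 0 []).length : Int)
  let res := (PySem.List.pyRange 0 m 1).foldl
    (fun res i =>
      let tmp := PySem.Dict.counter ((PySem.List.pyRange 0 n 1).map (fun j => PySem.List.pyGetD (PySem.List.pyGetD arr j []) i 0))
      let tmp2 := PySem.List.sorted2 tmp.items (fun x => x.2) (fun x => x.1)
      let sortedTmp := tmp2.foldl (fun st p => if p.1 ≠ 0 then st ++ [p.1] ++ [p.2] else st) []
      res ++ [sortedTmp]) []
  reversing (zeroPadding res)

-- ===== PORT B =====
-- termination measures of the while loops, named so the recursion carries small proofs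
theorem runEnd_dec (n j : Int) (h : j < n) : (n - (j + 1)).toNat < (n - j).toNat := by omega

-- inner 'while j < n and s[j] == s[i]: j += 1' scan of Source B
def runEnd (s : List Int) (n i j : Int) : Int :=
  if h : j < n ∧ PySem.List.pyGetD s j 0 = PySem.List.pyGetD s i 0 then
    runEnd s n i (j + 1)
  else j
termination_by (n - j).toNat
decreasing_by exact runEnd_dec n j h.1

-- the scan only moves forward: cited by rleLoop's decreasing_by
theorem le_runEnd (s : List Int) (n i j : Int) : j ≤ runEnd s n i j := by
  fun_induction runEnd s n i j with
  | case1 j h ih => omega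
  | case2 j h => omega

theorem lt_runEnd_self (s : List Int) (n i : Int) (h : i < n) : i < runEnd s n i i := by
  rw [runEnd, dif_pos ⟨h, rfl⟩]
  have := le_runEnd s n i (i + 1)
  omega

theorem rleLoop_dec (s : List Int) (n i : Int) (h : i < n) :
    (n - runEnd s n i i).toNat < (n - i).toNat := by
  have := lt_runEnd_self s n i h
  omega

-- outer 'while i < n' run scan of Source B (pairs collects nonzero (count, value) runs)
def rleLoop (s : List Int) (n i : Int) (pairs : List (Int × Int)) : List (Int × Int) :=
  if h : i < n then
    let j := runEnd s n i i
    rleLoop s n j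
      (if PySem.List.pyGetD s i 0 ≠ 0 then pairs ++ [(j - i, PySem.List.pyGetD s i 0)] else pairs)
  else pairs
termination_by (n - i).toNat
decreasing_by exact rleLoop_dec s n i h

-- peeling one layer strictly shrinks the total size: cited by peel's decreasing_by
theorem sum_len_tail_le (res : List (List Int)) :
    ((res.map (fun c => c.tail)).map List.length).sum ≤ (res.map List.length).sum := by
  induction res with
  | nil => simp
  | cons c t ih =>
    simp only [List.map_cons, List.sum_cons]
    have : c.tail.length ≤ c.length := by
      simp [List.length_tail]
    omega

theorem sum_len_tail_lt (res : List (List Int)) (h : res.any (fun c => !c.isEmpty) = true) :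
    ((res.map (fun c => PySem.List.slice c (some 1) none)).map List.length).sum
      < (res.map List.length).sum := by
  simp only [PySem.List.slice_from_one]
  induction res with
  | nil => simp at h
  | cons c t ih =>
    simp only [List.map_cons, List.sum_cons]
    simp only [List.any_cons, Bool.or_eq_true] at h
    rcases h with h | h
    · have hc : c ≠ [] := by
        cases c <;> simp_all
      have : c.tail.length < c.length := by
        cases c with
        | nil => simp at hc
        | cons x xs => simp
      have := sum_len_tail_le t
      omega
    · have := ih h
      have : c.tail.length ≤ c.length := by simp [List.length_tail]
      omega

theorem peel_dec (res : List (List Int)) (h : res.any (fun c => !c.isEmpty) = true) :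
    ((res.attach.map (fun x : {c // c ∈ res} => PySem.List.slice x.1 (some 1) none)).map List.length).sum
      < (res.map List.length).sum := by
  simpa using sum_len_tail_lt res h

-- 'while any(res): out.append([c[0] if c else 0 for c in res]); res = [c[1:] for c in res]'
def peel (res out : List (List Int)) : List (List Int) :=
  if h : res.any (fun c => !c.isEmpty) = true then
    peel (res.map (fun c => PySem.List.slice c (some 1) none))
      (out ++ [res.map (fun c => if c.isEmpty then (0:Int) else PySem.List.pyGetD c 0 0)])
  else out
termination_by (res.map List.length).sum
decreasing_by exact peel_dec res h

theorem zipStar_dec (rows : List (List Int)) (h : rows ≠ [] ∧ rows.all (fun r => !r.isEmpty) = true) :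
    (rows.attach.map (fun x : {r // r ∈ rows} => x.1.tail)).headI.length < rows.headI.length := by
  cases rows with
  | nil => exact absurd rfl h.1
  | cons r t =>
    have hr : r ≠ [] := by
      have := h.2
      simp only [List.all_cons, Bool.and_eq_true] at this
      cases r <;> simp_all
    cases r with
    | nil => exact absurd rfl hr
    | cons x xs => simp

-- zip(*arr): emit the heads while every row is nonempty (zip stops at the shortest row)
def zipStar (rows : List (List Int)) : List (List Int) :=
  if h : rows ≠ [] ∧ rows.all (fun r => !r.isEmpty) = true then
    rows.map (fun r => r.headI) :: zipStar (rows.map (fun r => r.tail))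
  else []
termination_by rows.headI.length
decreasing_by exact zipStar_dec rows h

def c_cal_alt (arr : List (List Int)) : List (List Int) :=
  let res := (zipStar arr).foldl
    (fun res col =>
      let s := PySem.List.sorted col (fun x => x)
      let n : Int := s.length
      let pairs := rleLoop s n 0 []
      let pairs := PySem.List.sorted2 pairs (fun p => p.1) (fun p => p.2)
      res ++ [pairs.flatMap (fun p => [p.2, p.1])]) []
  peel res []

-- ===== PRECONDITION & SPEC =====
-- Pre_ is exactly where the Python A returns: a nonempty matrix, a nonempty first row
-- (otherwise IndexError on arr[0] / ValueError in max), and no row shorter than the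
-- first (otherwise arr[j][i] raises IndexError).
def Pre_c_cal (arr : List (List Int)) : Prop :=
  arr ≠ [] ∧ arr.headI ≠ [] ∧ ∀ row ∈ arr, arr.headI.length ≤ row.length
instance (arr : List (List Int)) : Decidable (Pre_c_cal arr) := by unfold Pre_c_cal; infer_instance
def pvWitness_c_cal : List (List Int) := [[1, 2, 1], [1, 3, 0]]

def Spec_c_cal (arr : List (List Int)) (out : List (List Int)) : Prop := out = c_cal_alt arr
instance (arr : List (List Int)) (out : List (List Int)) : Decidable (Spec_c_cal arr out) := by unfold Spec_c_cal; infer_instance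

-- ===== CLAIM (what is proved, stated in full; the proofs are below) =====
def Claim_equal_c_cal : Prop := ∀ (arr : List (List Int)), Dom_c_cal arr → Pre_c_cal arr → Spec_c_cal arr (c_cal arr)

-- ===== LEMMAS AND PROOFS =====

-- ---------- A-side plumbing ----------

-- column i read through pyRange/pyGetD is just a map over the rows
lemma colA_eq_col (arr : List (List Int)) (i : Int) :
    (PySem.List.pyRange 0 (arr.length : Int) 1).map (fun j => PySem.List.pyGetD (PySem.List.pyGetD arr j []) i 0)
      = arr.map (fun row => PySem.List.pyGetD row i 0) := by
  have h := PySem.List.map_pyGetD_pyRange_zero (xs := arr) (d := ([] : List Int))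
  simp only [PySem.List.len_eq] at h
  calc (PySem.List.pyRange 0 (arr.length : Int) 1).map (fun j => PySem.List.pyGetD (PySem.List.pyGetD arr j []) i 0)
      = ((PySem.List.pyRange 0 (arr.length : Int) 1).map (fun j => PySem.List.pyGetD arr j [])).map (fun row => PySem.List.pyGetD row i 0) := by
        rw [List.map_map]; rfl
    _ = arr.map (fun row => PySem.List.pyGetD row i 0) := by rw [h]

-- A's conditional append loop emits the same flat list as a filter + flatMap
lemma emit_eq (L : List (Int × Int)) (acc : List Int) :
    L.foldl (fun st p => if p.1 ≠ 0 then st ++ [p.1] ++ [p.2] else st) acc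
      = acc ++ (L.filter (fun p => decide (p.1 ≠ 0))).flatMap (fun p => [p.1, p.2]) := by
  induction L generalizing acc with
  | nil => simp
  | cons p L ih =>
    simp only [List.foldl_cons, List.filter_cons]
    by_cases hp : p.1 ≠ 0
    · simp only [if_pos hp, ih]
      simp [hp]
    · simp only [if_neg hp, ih]
      simp only [ne_eq, not_not] at hp
      simp [hp]

-- an index loop 'a[i] = f(i, a[i])' over all indices is a mapIdx
lemma setfold {α : Type} (f : Nat → α → α) (d : α) (xs : List α) :
    ∀ k ≤ xs.length,
      (List.range k).foldl (fun a i => a.set i (f i (a.getD i d))) xs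
        = xs.mapIdx (fun i x => if i < k then f i x else x) := by
  intro k
  induction k with
  | zero =>
    intro _
    simp only [List.range_zero, List.foldl_nil]
    apply List.ext_getElem (by simp)
    intro i h1 h2
    simp
  | succ k ih =>
    intro hk
    rw [List.range_succ, List.foldl_append, ih (by omega)]
    simp only [List.foldl_cons, List.foldl_nil]
    have hklen : k < (xs.mapIdx (fun i x => if i < k then f i x else x)).length := by simp; omega
    have hget : (xs.mapIdx (fun i x => if i < k then f i x else x)).getD k d = xs[k]'(by omega) := by
      rw [List.getD_eq_getElem _ _ hklen]
      simp
    rw [hget]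
    apply List.ext_getElem (by simp)
    intro i h1 h2
    rw [List.getElem_set]
    by_cases hik : i = k
    · subst hik
      simp
    · have h3 : i < xs.length := by simpa using h2
      rw [if_neg (by omega : ¬ k = i)]
      simp only [List.getElem_mapIdx]
      by_cases h4 : i < k
      · rw [if_pos h4, if_pos (by omega)]
      · rw [if_neg h4, if_neg (by omega)]

-- the list of row lengths read through pyRange/pyGetD is a plain map
lemma lens_eq (arr : List (List Int)) :
    ((PySem.List.pyRange 0 (arr.length : Int) 1).map (fun i => ((PySem.List.pyGetD arr i []).length : Int)))
      = arr.map (fun r => (r.length : Int)) := by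
  have h := PySem.List.map_pyGetD_pyRange_zero (xs := arr) (d := ([] : List Int))
  simp only [PySem.List.len_eq] at h
  calc ((PySem.List.pyRange 0 (arr.length : Int) 1).map (fun i => ((PySem.List.pyGetD arr i []).length : Int)))
      = ((PySem.List.pyRange 0 (arr.length : Int) 1).map (fun i => PySem.List.pyGetD arr i [])).map (fun r => (r.length : Int)) := by
        rw [List.map_map]; rfl
    _ = arr.map (fun r => (r.length : Int)) := by rw [h]

-- zero_padding pads every row of res to the common maximum length M
lemma zeroPadding_eq (res : List (List Int)) (M : Int)
    (hmax : PySem.List.max? (res.map (fun r => (r.length : Int))) (fun x => x) = some M) :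
    zeroPadding res = res.map (fun r => r ++ List.replicate (M - (r.length : Int)).toNat 0) := by
  unfold zeroPadding
  simp only [lens_eq res, hmax]
  rw [PySem.List.pyRange_zero_nat, List.foldl_map]
  have hbody : (fun (a : List (List Int)) (i : Nat) =>
      a.set ((i : Int)).toNat (PySem.List.pyGetD a (i : Int) [] ++ List.replicate (M - ((PySem.List.pyGetD a (i : Int) []).length : Int)).toNat 0))
      = fun a i => a.set i ((fun (_ : Nat) (x : List Int) => x ++ List.replicate (M - (x.length : Int)).toNat 0) i (a.getD i [])) := by
    funext a i
    rw [PySem.List.pyGetD_natCast]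
    simp
  rw [hbody, setfold (fun (_ : Nat) (x : List Int) => x ++ List.replicate (M - (x.length : Int)).toNat 0) ([] : List Int) res res.length (le_refl _)]
  apply List.ext_getElem (by simp)
  intro i h1 h2
  have h3 : i < res.length := by simpa using h2
  simp [List.getElem_mapIdx, h3]

-- the doubly-nested index-assignment loop fills the M × n0 zero matrix with e i j at [j][i]
lemma transfold (e : Nat → Nat → Int) (M n0 : Nat) :
    ∀ k ≤ n0,
      (List.range k).foldl
        (fun a i => (List.range M).foldl (fun a j => a.set j ((a.getD j []).set i (e i j))) a)
        (List.replicate M (List.replicate n0 (0:Int)))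
      = (List.range M).map (fun j => (List.range n0).map (fun i => if i < k then e i j else 0)) := by
  intro k
  induction k with
  | zero =>
    intro _
    simp only [List.range_zero, List.foldl_nil]
    apply List.ext_getElem (by simp)
    intro j h1 h2
    simp
  | succ k ih =>
    intro hk
    rw [List.range_succ, List.foldl_append, ih (by omega)]
    simp only [List.foldl_cons, List.foldl_nil]
    set Rk := (List.range M).map (fun j => (List.range n0).map (fun i => if i < k then e i j else 0)) with hRk
    have hlen : Rk.length = M := by simp [hRk]
    have hbody : (fun (a : List (List Int)) (j : Nat) => a.set j ((a.getD j []).set k (e k j)))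
        = fun a j => a.set j ((fun (j : Nat) (r : List Int) => r.set k (e k j)) j (a.getD j [])) := by rfl
    rw [hbody]
    rw [show (List.range M) = List.range Rk.length by rw [hlen]]
    rw [setfold (fun (j : Nat) (r : List Int) => r.set k (e k j)) ([] : List Int) Rk Rk.length (le_refl _)]
    apply List.ext_getElem (by simp [hRk])
    intro j h1 h2
    have hjM : j < M := by simpa [hRk] using h2
    simp only [List.getElem_mapIdx, hlen, hjM, if_pos]
    simp only [hRk, List.getElem_map, List.getElem_range]
    apply List.ext_getElem (by simp)
    intro i g1 g2
    have hin : i < n0 := by simpa using g2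
    rw [List.getElem_set]
    by_cases hik : k = i
    · subst hik
      simp
    · simp only [if_neg hik, List.getElem_map, List.getElem_range]
      by_cases h4 : i < k
      · rw [if_pos h4, if_pos (by omega)]
      · rw [if_neg h4, if_neg (by omega)]

-- the nested assignment loops of reversing build exactly the transpose
lemma reversing_eq (P : List (List Int)) (M : Nat) (hne : P ≠ [])
    (hlen : ∀ r ∈ P, r.length = M) :
    reversing P = (List.range M).map (fun j => P.map (fun r => r.getD j 0)) := by
  unfold reversing
  have h0 : PySem.List.pyGetD P 0 [] = P.getD 0 [] := by
    rw [show ((0:Int)) = ((0:Nat):Int) by rfl, PySem.List.pyGetD_natCast]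
  have hM : (P.getD 0 []).length = M := by
    cases P with
    | nil => simp at hne
    | cons r t => exact hlen r (by simp)
  simp only [h0, hM]
  rw [show ((M : Int)).toNat = M by simp, show ((P.length : Int)).toNat = P.length by simp]
  rw [PySem.List.pyRange_zero_nat M, PySem.List.pyRange_zero_nat P.length, List.foldl_map]
  have hbody : (fun (a : List (List Int)) (i : Nat) =>
        (List.map (fun (k : Nat) => (k : Int)) (List.range M)).foldl
          (fun a j => a.set j.toNat ((PySem.List.pyGetD a j []).set ((i:Int)).toNat (PySem.List.pyGetD (PySem.List.pyGetD P (i:Int) []) j 0))) a)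
      = fun (a : List (List Int)) (i : Nat) =>
          (List.range M).foldl (fun a j => a.set j ((a.getD j []).set i ((P.getD i []).getD j 0))) a := by
    funext a i
    rw [List.foldl_map]
    have hinner : (fun (a : List (List Int)) (j : Nat) =>
          a.set ((j:Int)).toNat ((PySem.List.pyGetD a ((j:Int)) []).set ((i:Int)).toNat (PySem.List.pyGetD (PySem.List.pyGetD P ((i:Int)) []) ((j:Int)) 0)))
        = fun a j => a.set j ((a.getD j []).set i ((P.getD i []).getD j 0)) := by
      funext a j
      rw [PySem.List.pyGetD_natCast, PySem.List.pyGetD_natCast, PySem.List.pyGetD_natCast]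
      simp
    rw [hinner]
  rw [hbody]
  rw [transfold (fun i j => (P.getD i []).getD j 0) M P.length P.length (le_refl _)]
  apply List.ext_getElem (by simp)
  intro j h1 h2
  simp only [List.getElem_map, List.getElem_range]
  apply List.ext_getElem (by simp)
  intro i g1 g2
  have hin : i < P.length := by simpa using g2
  simp [hin]

-- ---------- B-side: the RLE scan computes the runs of the sorted column ----------

theorem rleList_dec (x : Int) (t : List Int) :
    (t.dropWhile (fun y => y == x)).length < (x :: t).length := by
  have := (List.dropWhile_sublist (p := fun y => y == x) (l := t)).length_le
  simp only [List.length_cons]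
  omega

-- spec-level run-length encoding (what rleLoop computes on s), nonzero runs only
def rleList (s : List Int) : List (Int × Int) :=
  match s with
  | [] => []
  | x :: t =>
      (if x ≠ 0 then [((1 + ((t.takeWhile (fun y => y == x)).length : Int), x))] else [])
        ++ rleList (t.dropWhile (fun y => y == x))
termination_by s.length
decreasing_by exact rleList_dec x t

lemma rleList_nil : rleList [] = [] := by unfold rleList; rfl

lemma rleList_cons (x : Int) (t : List Int) :
    rleList (x :: t) = (if x ≠ 0 then [((1 + ((t.takeWhile (fun y => y == x)).length : Int), x))] else [])
        ++ rleList (t.dropWhile (fun y => y == x)) := by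
  rw [rleList.eq_def]

lemma runEnd_spec (s : List Int) (i : Int) :
    ∀ j : Int, 0 ≤ j →
      runEnd s (s.length : Int) i j
        = j + (((s.drop j.toNat).takeWhile (fun y => y == PySem.List.pyGetD s i 0)).length : Int) := by
  intro j hj
  induction hfuel : ((s.length : Int) - j).toNat using Nat.strong_induction_on generalizing j with
  | _ fuel ih =>
    rw [runEnd]
    by_cases hcond : j < (s.length : Int) ∧ PySem.List.pyGetD s j 0 = PySem.List.pyGetD s i 0
    · rw [dif_pos hcond]
      obtain ⟨hjn, hxeq⟩ := hcond
      have hjN : j.toNat < s.length := by omega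
      have hdrop : s.drop j.toNat = s[j.toNat] :: s.drop (j.toNat + 1) := List.drop_eq_getElem_cons hjN
      have hsj : s[j.toNat] = PySem.List.pyGetD s i 0 := by
        rw [← PySem.List.pyGetD_eq_getElem (xs := s) (i := j) (d := 0) hj (by omega)]
        exact hxeq
      have hrec := ih (((s.length : Int) - (j+1)).toNat) (by omega) (j+1) (by omega) rfl
      rw [hrec]
      rw [hdrop]
      simp only [List.takeWhile_cons, hsj, beq_self_eq_true, if_pos]
      have h1 : (j + 1).toNat = j.toNat + 1 := by omega
      rw [h1]
      simp only [List.length_cons]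
      push_cast
      ring
    · rw [dif_neg hcond]
      by_cases hjn : j < (s.length : Int)
      · have hjN : j.toNat < s.length := by omega
        have hdrop : s.drop j.toNat = s[j.toNat] :: s.drop (j.toNat + 1) := List.drop_eq_getElem_cons hjN
        have hne : ¬ (s[j.toNat] = PySem.List.pyGetD s i 0) := by
          intro hc
          apply hcond
          refine ⟨hjn, ?_⟩
          rw [PySem.List.pyGetD_eq_getElem (xs := s) (i := j) (d := 0) hj (by omega)]
          exact hc
        rw [hdrop]
        simp only [List.takeWhile_cons]
        rw [if_neg (by simpa using hne)]
        simp
      · have hge : s.length ≤ j.toNat := by omega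
        rw [List.drop_eq_nil_of_le hge]
        simp

lemma rleLoop_spec (s : List Int) :
    ∀ i : Int, 0 ≤ i → i ≤ (s.length : Int) → ∀ acc,
      rleLoop s (s.length : Int) i acc = acc ++ rleList (s.drop i.toNat) := by
  intro i hi hin acc
  induction hfuel : ((s.length : Int) - i).toNat using Nat.strong_induction_on generalizing i acc with
  | _ fuel ih =>
    rw [rleLoop]
    by_cases hcond : i < (s.length : Int)
    · rw [dif_pos hcond]
      have hiN : i.toNat < s.length := by omega
      have hx : PySem.List.pyGetD s i 0 = s[i.toNat] :=
        PySem.List.pyGetD_eq_getElem (xs := s) (i := i) (d := 0) hi (by omega)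
      have hdrop : s.drop i.toNat = s[i.toNat] :: s.drop (i.toNat + 1) := List.drop_eq_getElem_cons hiN
      set x := s[i.toNat] with hxdef
      set t := s.drop (i.toNat + 1) with htdef
      have hrE : runEnd s (s.length : Int) i i
          = i + (((s.drop i.toNat).takeWhile (fun y => y == PySem.List.pyGetD s i 0)).length : Int) :=
        runEnd_spec s i i hi
      have htw : (s.drop i.toNat).takeWhile (fun y => y == PySem.List.pyGetD s i 0)
          = x :: t.takeWhile (fun y => y == x) := by
        rw [hdrop, hx]
        simp
      have hj : runEnd s (s.length : Int) i i = i + 1 + ((t.takeWhile (fun y => y == x)).length : Int) := by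
        rw [hrE, htw]
        simp only [List.length_cons]
        push_cast
        ring
      have htwle : (t.takeWhile (fun y => y == x)).length ≤ t.length :=
        (List.takeWhile_sublist _).length_le
      have htlen : t.length = s.length - (i.toNat + 1) := by simp [htdef]
      have hjnonneg : 0 ≤ runEnd s (s.length : Int) i i := by omega
      have hjle : runEnd s (s.length : Int) i i ≤ (s.length : Int) := by omega
      have hdropj : s.drop (runEnd s (s.length : Int) i i).toNat = t.dropWhile (fun y => y == x) := by
        have h1 : (runEnd s (s.length : Int) i i).toNat = (i.toNat + 1) + (t.takeWhile (fun y => y == x)).length := by omega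
        rw [h1, ← List.drop_drop, ← htdef]
        calc t.drop (t.takeWhile (fun y => y == x)).length
            = ((t.takeWhile (fun y => y == x)) ++ (t.dropWhile (fun y => y == x))).drop (t.takeWhile (fun y => y == x)).length := by
              rw [List.takeWhile_append_dropWhile]
          _ = t.dropWhile (fun y => y == x) := by rw [List.drop_left]
      have hrec := ih (((s.length : Int) - runEnd s (s.length : Int) i i).toNat) (by omega)
        (runEnd s (s.length : Int) i i) hjnonneg hjle
        (if PySem.List.pyGetD s i 0 ≠ 0 then acc ++ [(runEnd s (s.length : Int) i i - i, PySem.List.pyGetD s i 0)] else acc) rfl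
      simp only at hrec ⊢
      rw [hrec, hdropj]
      have hrl : rleList (s.drop i.toNat)
          = (if x ≠ 0 then [((1 + ((t.takeWhile (fun y => y == x)).length : Int), x))] else [])
              ++ rleList (t.dropWhile (fun y => y == x)) := by
        rw [hdrop, rleList_cons]
      rw [hrl, hx]
      by_cases hx0 : x ≠ 0
      · rw [if_pos hx0, if_pos hx0]
        have h2 : runEnd s (s.length : Int) i i - i = 1 + ((t.takeWhile (fun y => y == x)).length : Int) := by omega
        rw [h2]
        simp
      · rw [if_neg hx0, if_neg hx0]
        simp
    · rw [dif_neg hcond]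
      have hge : s.length ≤ i.toNat := by omega
      rw [List.drop_eq_nil_of_le hge]
      simp [rleList_nil]

-- on a sorted list, everything past the first run is strictly larger than the run value
lemma dropWhile_gt (x : Int) (t : List Int) (hx : ∀ y ∈ t, x ≤ y) (ht : t.Pairwise (· ≤ ·)) :
    ∀ z ∈ t.dropWhile (fun y => y == x), x < z := by
  induction t with
  | nil => simp
  | cons y rest ih =>
    intro z hz
    rw [List.dropWhile_cons] at hz
    by_cases hyx : (y == x) = true
    · rw [if_pos hyx] at hz
      exact ih (fun w hw => hx w (by simp [hw])) ((List.pairwise_cons.mp ht).2) z hz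
    · rw [if_neg hyx] at hz
      have hyx' : y ≠ x := by simpa using hyx
      have hxy : x < y := lt_of_le_of_ne (hx y (by simp)) (Ne.symm hyx')
      rcases List.mem_cons.mp hz with h | h
      · omega
      · have : y ≤ z := (List.pairwise_cons.mp ht).1 z h
        omega

-- on a sorted list, the RLE pairs are exactly (count v, v) for the distinct nonzero v
lemma rleList_mem (s : List Int) (hs : s.Pairwise (· ≤ ·)) :
    ∀ p : Int × Int, p ∈ rleList s ↔ (p.2 ∈ s ∧ p.2 ≠ 0 ∧ p.1 = (s.count p.2 : Int)) := by
  induction hfuel : s.length using Nat.strong_induction_on generalizing s with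
  | _ fuel ih =>
    cases s with
    | nil => intro p; simp [rleList_nil]
    | cons x t =>
      intro p
      have hx : ∀ y ∈ t, x ≤ y := (List.pairwise_cons.mp hs).1
      have ht : t.Pairwise (· ≤ ·) := (List.pairwise_cons.mp hs).2
      set tw := t.takeWhile (fun y => y == x) with htw
      set dw := t.dropWhile (fun y => y == x) with hdw
      have htsplit : t = tw ++ dw := by
        rw [htw, hdw, List.takeWhile_append_dropWhile]
      have htweq : ∀ y ∈ tw, y = x := by
        intro y hy
        rw [htw] at hy
        have := List.mem_takeWhile_imp hy
        simpa using this
      have hdwgt : ∀ z ∈ dw, x < z := by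
        intro z hz
        exact dropWhile_gt x t hx ht z (by rw [← hdw]; exact hz)
      have hdwpw : dw.Pairwise (· ≤ ·) := by
        rw [hdw]; exact ht.sublist (List.dropWhile_sublist _)
      have hdwlen : dw.length < (x :: t).length := by
        have : dw.length ≤ t.length := by
          rw [hdw]; exact (List.dropWhile_sublist _).length_le
        simp only [List.length_cons]
        omega
      have hcountx : (x :: t).count x = 1 + tw.length := by
        rw [List.count_cons_self, htsplit, List.count_append]
        have h1 : tw.count x = tw.length := List.count_eq_length.mpr (by intro b hb; exact (htweq b hb).symm)
        have h2 : dw.count x = 0 := by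
          rw [List.count_eq_zero]
          intro hc
          exact absurd (hdwgt x hc) (by omega)
        omega
      have hcountdw : ∀ v ∈ dw, (x :: t).count v = dw.count v := by
        intro v hv
        have hvx : x < v := hdwgt v hv
        rw [List.count_cons_of_ne (by omega), htsplit, List.count_append]
        have h1 : tw.count v = 0 := by
          rw [List.count_eq_zero]
          intro hc
          exact absurd (htweq v hc) (by omega)
        omega
      rw [rleList_cons, ← htw, ← hdw]
      have ihdw := ih dw.length (by omega) dw hdwpw rfl
      constructor
      · intro hp
        rw [List.mem_append] at hp
        rcases hp with hp | hp
        · by_cases hx0 : x ≠ 0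
          · rw [if_pos hx0] at hp
            simp only [List.mem_singleton] at hp
            subst hp
            refine ⟨by simp, hx0, ?_⟩
            simp only
            rw [hcountx]
            push_cast
            ring
          · rw [if_neg hx0] at hp; simp at hp
        · obtain ⟨h1, h2, h3⟩ := (ihdw p).mp hp
          refine ⟨?_, h2, ?_⟩
          · rw [htsplit]
            simp [h1]
          · rw [h3, hcountdw p.2 h1]
      · rintro ⟨h1, h2, h3⟩
        rw [List.mem_append]
        by_cases hvx : p.2 = x
        · left
          have hx0 : x ≠ 0 := hvx ▸ h2
          rw [if_pos hx0]
          simp only [List.mem_singleton]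
          have h4 : p.1 = 1 + (tw.length : Int) := by
            rw [h3, hvx, hcountx]; push_cast; ring
          cases p
          simp only at hvx h4 ⊢
          rw [h4, hvx]
        · right
          have hmem : p.2 ∈ dw := by
            rcases List.mem_cons.mp h1 with h | h
            · exact absurd h hvx
            · rw [htsplit] at h
              rcases List.mem_append.mp h with h | h
              · exact absurd (htweq _ h) hvx
              · exact h
          exact (ihdw p).mpr ⟨hmem, h2, by rw [h3, hcountdw p.2 hmem]⟩

-- on a sorted list, RLE values are strictly increasing
lemma rleList_pairwise (s : List Int) (hs : s.Pairwise (· ≤ ·)) :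
    (rleList s).Pairwise (fun a b => a.2 < b.2) := by
  induction hfuel : s.length using Nat.strong_induction_on generalizing s with
  | _ fuel ih =>
    cases s with
    | nil => simp [rleList_nil]
    | cons x t =>
      have hx : ∀ y ∈ t, x ≤ y := (List.pairwise_cons.mp hs).1
      have ht : t.Pairwise (· ≤ ·) := (List.pairwise_cons.mp hs).2
      set tw := t.takeWhile (fun y => y == x) with htw
      set dw := t.dropWhile (fun y => y == x) with hdw
      have hdwgt : ∀ z ∈ dw, x < z := by
        intro z hz
        exact dropWhile_gt x t hx ht z (by rw [← hdw]; exact hz)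
      have hdwpw : dw.Pairwise (· ≤ ·) := by
        rw [hdw]; exact ht.sublist (List.dropWhile_sublist _)
      have hdwlen : dw.length < (x :: t).length := by
        have : dw.length ≤ t.length := by
          rw [hdw]; exact (List.dropWhile_sublist _).length_le
        simp only [List.length_cons]
        omega
      have ihdw := ih dw.length (by omega) dw hdwpw rfl
      rw [rleList_cons, ← htw, ← hdw]
      by_cases hx0 : x ≠ 0
      · rw [if_pos hx0]
        simp only [List.singleton_append, List.pairwise_cons]
        refine ⟨?_, ihdw⟩
        intro p hp
        have := ((rleList_mem dw hdwpw p).mp hp).1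
        exact hdwgt p.2 this
      · rw [if_neg hx0]
        simpa using ihdw

-- ---------- sorted2 and lexicographic uniqueness ----------

-- the non-strict lexicographic orders that Python's tuple sorts produce
def Rsf (a b : Int × Int) : Prop := a.2 < b.2 ∨ (a.2 = b.2 ∧ a.1 ≤ b.1)
def Rfs (a b : Int × Int) : Prop := a.1 < b.1 ∨ (a.1 = b.1 ∧ a.2 ≤ b.2)

lemma insertBy_pairwise_gen {α : Type} (R : α → α → Prop)
    (htrans : ∀ a b c, R a b → R b c → R a c)
    (before : α → α → Bool)
    (h1 : ∀ a b, before a b = true → R a b) (h2 : ∀ a b, before a b = false → R b a)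
    (x : α) :
    ∀ ys : List α, ys.Pairwise R → (PySem.List.insertBy before x ys).Pairwise R := by
  intro ys
  induction ys with
  | nil =>
    intro _
    simp [PySem.List.insertBy]
  | cons y ys ih =>
    intro hys
    rw [PySem.List.insertBy]
    by_cases hb : before x y = true
    · rw [if_pos hb]
      rw [List.pairwise_cons]
      refine ⟨?_, hys⟩
      intro z hz
      have hxy : R x y := h1 _ _ hb
      rcases List.mem_cons.mp hz with h | h
      · subst h; exact hxy
      · exact htrans _ _ _ hxy ((List.pairwise_cons.mp hys).1 z h)
    · rw [if_neg hb]
      rw [List.pairwise_cons]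
      refine ⟨?_, ih (List.pairwise_cons.mp hys).2⟩
      intro z hz
      rw [PySem.List.mem_insertBy] at hz
      rcases hz with h | h
      · subst h
        exact h2 _ _ (by simpa using hb)
      · exact (List.pairwise_cons.mp hys).1 z h

lemma foldl_insertBy_pairwise {α : Type} (R : α → α → Prop)
    (htrans : ∀ a b c, R a b → R b c → R a c)
    (before : α → α → Bool)
    (h1 : ∀ a b, before a b = true → R a b) (h2 : ∀ a b, before a b = false → R b a) :
    ∀ (xs acc : List α), acc.Pairwise R →
      (xs.foldl (fun acc x => PySem.List.insertBy before x acc) acc).Pairwise R := by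
  intro xs
  induction xs with
  | nil => intro acc h; simpa using h
  | cons x xs ih =>
    intro acc h
    simp only [List.foldl_cons]
    exact ih _ (insertBy_pairwise_gen R htrans before h1 h2 x acc h)

lemma sorted2_21_pairwise (xs : List (Int × Int)) :
    (PySem.List.sorted2 xs (fun p => p.2) (fun p => p.1)).Pairwise Rsf :=
  foldl_insertBy_pairwise Rsf (by unfold Rsf; omega)
    (fun a b => decide (a.2 < b.2) || (!decide (b.2 < a.2) && decide (a.1 < b.1)))
    (by intro a b h; simp at h; unfold Rsf; omega)
    (by intro a b h; simp at h; unfold Rsf; omega)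
    xs [] (by simp)

lemma sorted2_12_pairwise (xs : List (Int × Int)) :
    (PySem.List.sorted2 xs (fun p => p.1) (fun p => p.2)).Pairwise Rfs :=
  foldl_insertBy_pairwise Rfs (by unfold Rfs; omega)
    (fun a b => decide (a.1 < b.1) || (!decide (b.1 < a.1) && decide (a.2 < b.2)))
    (by intro a b h; simp at h; unfold Rfs; omega)
    (by intro a b h; simp at h; unfold Rfs; omega)
    xs [] (by simp)

-- two Rsf-sorted permutations are equal (Rsf is an antisymmetric total order)
lemma eq_of_perm_pairwise (l₁ l₂ : List (Int × Int)) (hperm : l₁.Perm l₂)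
    (h1 : l₁.Pairwise Rsf) (h2 : l₂.Pairwise Rsf) : l₁ = l₂ := by
  induction l₁ generalizing l₂ with
  | nil => simpa using hperm.nil_eq
  | cons a t₁ ih =>
    cases l₂ with
    | nil => exact absurd hperm.symm.nil_eq (by simp)
    | cons b t₂ =>
      have hab : a = b := by
        by_cases h : a = b
        · exact h
        · have ha2 : a ∈ b :: t₂ := hperm.subset (by simp)
          have hb1 : b ∈ a :: t₁ := hperm.symm.subset (by simp)
          have ha2' : a ∈ t₂ := by
            rcases List.mem_cons.mp ha2 with hc | hc
            · exact absurd hc h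
            · exact hc
          have hb1' : b ∈ t₁ := by
            rcases List.mem_cons.mp hb1 with hc | hc
            · exact absurd hc.symm h
            · exact hc
          have hRab : Rsf a b := (List.pairwise_cons.mp h1).1 b hb1'
          have hRba : Rsf b a := (List.pairwise_cons.mp h2).1 a ha2'
          unfold Rsf at hRab hRba
          cases a; cases b
          simp only [Prod.mk.injEq]
          constructor <;> omega
      subst hab
      have htperm : t₁.Perm t₂ := hperm.cons_inv
      rw [ih t₂ htperm (List.pairwise_cons.mp h1).2 (List.pairwise_cons.mp h2).2]

-- ---------- per-column equality: Counter + sort-by-(cnt,num)  =  sort + RLE + pair sort ----------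

lemma col_eq (col : List Int) :
    ((PySem.List.sorted2 (PySem.Dict.counter col).items (fun x => x.2) (fun x => x.1)).filter
        (fun p => decide (p.1 ≠ 0))).flatMap (fun p => [p.1, p.2])
      = (PySem.List.sorted2
            (rleLoop (PySem.List.sorted col (fun x => x)) (((PySem.List.sorted col (fun x => x)).length : Int)) 0 [])
            (fun p => p.1) (fun p => p.2)).flatMap (fun p => [p.2, p.1]) := by
  set s := PySem.List.sorted col (fun x => x) with hsdef
  have hsperm : s.Perm col := PySem.List.sorted_perm col (fun x => x) false
  have hs : s.Pairwise (· ≤ ·) := by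
    have := PySem.List.sorted_pairwise (xs := col) (key := fun x => x)
    rw [← hsdef] at this
    exact this
  have hrle : rleLoop s ((s.length : Int)) 0 [] = rleList s := by
    have := rleLoop_spec s 0 (by omega) (by exact_mod_cast Nat.zero_le _) []
    simpa using this
  rw [hrle]
  have hswap : (PySem.List.sorted2 (rleList s) (fun p => p.1) (fun p => p.2)).flatMap (fun p => [p.2, p.1])
      = ((PySem.List.sorted2 (rleList s) (fun p => p.1) (fun p => p.2)).map Prod.swap).flatMap
          (fun p => [p.1, p.2]) := by
    rw [List.flatMap_map]
    rfl
  rw [hswap]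
  congr 1
  -- membership characterisation of both sides
  have hmemL : ∀ x : Int × Int,
      x ∈ ((PySem.Dict.counter col).items.filter (fun p => decide (p.1 ≠ 0)))
        ↔ (x.1 ∈ col ∧ x.1 ≠ 0 ∧ x.2 = (col.count x.1 : Int)) := by
    intro x
    rw [List.mem_filter, PySem.Dict.items_counter, List.mem_map]
    constructor
    · rintro ⟨⟨k, hk, rfl⟩, hp⟩
      refine ⟨(PySem.Set.mem_ofList _ _).mp hk, by simpa using hp, rfl⟩
    · rintro ⟨h1, h2, h3⟩
      refine ⟨⟨x.1, (PySem.Set.mem_ofList _ _).mpr h1, ?_⟩, by simpa using h2⟩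
      cases x
      simp only at h3 ⊢
      rw [h3]
  have hmemR : ∀ x : Int × Int,
      x ∈ (rleList s).map Prod.swap
        ↔ (x.1 ∈ col ∧ x.1 ≠ 0 ∧ x.2 = (col.count x.1 : Int)) := by
    intro x
    rw [List.mem_map]
    constructor
    · rintro ⟨q, hq, rfl⟩
      obtain ⟨h1, h2, h3⟩ := (rleList_mem s hs q).mp hq
      exact ⟨hsperm.mem_iff.mp h1, h2, by rw [Prod.snd_swap, Prod.fst_swap, h3, hsperm.count_eq]⟩
    · rintro ⟨h1, h2, h3⟩
      refine ⟨x.swap, (rleList_mem s hs x.swap).mpr ⟨?_, by simpa using h2, ?_⟩, Prod.swap_swap x⟩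
      · simpa using hsperm.mem_iff.mpr h1
      · rw [Prod.fst_swap, Prod.snd_swap, hsperm.count_eq]
        simpa using h3
  -- both sides are nodup
  have hndL : ((PySem.Dict.counter col).items.filter (fun p => decide (p.1 ≠ 0))).Nodup := by
    apply List.Nodup.filter
    rw [PySem.Dict.items_counter]
    exact (PySem.Set.nodup_ofList col).map (fun a b h => congrArg Prod.fst h)
  have hndR : ((rleList s).map Prod.swap).Nodup := by
    apply List.Nodup.map Prod.swap_injective
    exact (rleList_pairwise s hs).imp (fun {a b} h hEq => by rw [hEq] at h; omega)
  -- assemble by uniqueness of the Rsf-sorted arrangement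
  have hp1 : ((PySem.List.sorted2 (PySem.Dict.counter col).items (fun x => x.2) (fun x => x.1)).filter
        (fun p => decide (p.1 ≠ 0))).Perm
      ((PySem.Dict.counter col).items.filter (fun p => decide (p.1 ≠ 0))) :=
    (PySem.List.sorted2_perm _ _ _ _).filter _
  have hp2 : ((PySem.Dict.counter col).items.filter (fun p => decide (p.1 ≠ 0))).Perm
      ((rleList s).map Prod.swap) := by
    apply (List.perm_ext_iff_of_nodup hndL hndR).mpr
    intro x
    rw [hmemL x, hmemR x]
  have hp3 : ((rleList s).map Prod.swap).Perm
      ((PySem.List.sorted2 (rleList s) (fun p => p.1) (fun p => p.2)).map Prod.swap) :=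
    ((PySem.List.sorted2_perm _ _ _ _).map _).symm
  apply eq_of_perm_pairwise
  · exact hp1.trans (hp2.trans hp3)
  · exact (sorted2_21_pairwise _).filter _
  · rw [List.pairwise_map]
    exact (sorted2_12_pairwise _).imp (fun {a b} h => by
      unfold Rfs at h
      unfold Rsf
      simp only [Prod.snd_swap, Prod.fst_swap]
      omega)

-- ---------- zipStar and peel ----------

lemma tail_getD (r : List Int) (j : Nat) : r.tail.getD j 0 = r.getD (j + 1) 0 := by
  cases r <;> simp

-- under Pre_, zip(*arr) is exactly the list of the first headI.length columns
lemma zipStar_eq : ∀ (k : Nat) (arr : List (List Int)), arr ≠ [] → arr.headI.length = k →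
    (∀ r ∈ arr, k ≤ r.length) →
    zipStar arr = (List.range k).map (fun i => arr.map (fun r => r.getD i 0)) := by
  intro k
  induction k with
  | zero =>
    intro arr hne hlen _
    rw [zipStar, dif_neg]
    · simp
    · rintro ⟨-, hall⟩
      cases arr with
      | nil => exact hne rfl
      | cons r t =>
        have hr : r = [] := by
          have : r.length = 0 := hlen
          exact List.length_eq_zero_iff.mp this
        subst hr
        simp at hall
  | succ k ih =>
    intro arr hne hlen hrows
    have hallne : arr.all (fun r => !r.isEmpty) = true := by
      rw [List.all_eq_true]
      intro r hr
      have := hrows r hr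
      cases r with
      | nil => simp at this
      | cons a b => simp
    rw [zipStar, dif_pos ⟨hne, hallne⟩]
    have harr' : (arr.map (fun r : List Int => r.tail)) ≠ [] := by
      cases arr with
      | nil => exact absurd rfl hne
      | cons r t => simp
    have hlen' : (arr.map (fun r : List Int => r.tail)).headI.length = k := by
      cases arr with
      | nil => exact absurd rfl hne
      | cons c t =>
        have hc : c.length = k + 1 := hlen
        show (List.map (fun r : List Int => r.tail) (c :: t)).headI.length = k
        rw [List.map_cons]
        show c.tail.length = k
        rw [List.length_tail, hc]
        omega
    have hrows' : ∀ r ∈ arr.map (fun r : List Int => r.tail), k ≤ r.length := by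
      rintro r' hr'
      obtain ⟨r, hr, rfl⟩ := List.mem_map.mp hr'
      have := hrows r hr
      simp [List.length_tail]
      omega
    rw [ih _ harr' hlen' hrows']
    have hheads : arr.map (fun r => r.headI) = arr.map (fun r => r.getD 0 0) := by
      apply List.map_congr_left
      intro r hr
      have := hrows r hr
      cases r with
      | nil => simp at this
      | cons a b => simp
    rw [hheads, List.range_succ_eq_map]
    simp only [List.map_cons, List.map_map]
    congr 1
    apply List.map_congr_left
    intro i _
    simp only [Function.comp_apply]
    apply List.map_congr_left
    intro c _
    simp only [Function.comp_apply]
    exact tail_getD c i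

-- the peeling loop produces exactly the zero-padded transpose, row by row
lemma peel_spec : ∀ (K : Nat) (res out : List (List Int)),
    (∀ r ∈ res, r.length ≤ K) → (K = 0 ∨ ∃ r ∈ res, r.length = K) →
    peel res out = out ++ (List.range K).map (fun j => res.map (fun r => r.getD j 0)) := by
  intro K
  induction K with
  | zero =>
    intro res out hub _
    rw [peel, dif_neg]
    · simp
    · intro hany
      obtain ⟨c, hc, hcne⟩ := List.any_eq_true.mp hany
      have h0 : c.length = 0 := by
        have := hub c hc
        omega
      have : c = [] := List.length_eq_zero_iff.mp h0
      subst this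
      simp at hcne
  | succ K ih =>
    intro res out hub hat
    rcases hat with h | ⟨r0, hr0, hr0len⟩
    · exact absurd h (Nat.succ_ne_zero K)
    rw [peel, dif_pos]
    · have hslice : res.map (fun c => PySem.List.slice c (some 1) none) = res.map (fun c => c.tail) := by
        apply List.map_congr_left
        intro c _
        exact PySem.List.slice_from_one c
      have hhead : res.map (fun c => if c.isEmpty then (0:Int) else PySem.List.pyGetD c 0 0)
          = res.map (fun c => c.getD 0 0) := by
        apply List.map_congr_left
        intro c _
        by_cases hc : c.isEmpty
        · have : c = [] := by cases c <;> simp_all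
          subst this
          simp
        · rw [if_neg hc, PySem.List.pyGetD_zero]
      rw [hslice, hhead, ih (res.map (fun c => c.tail)) (out ++ [res.map (fun c => c.getD 0 0)])
        (by
          rintro r' hr'
          obtain ⟨c, hc, rfl⟩ := List.mem_map.mp hr'
          have := hub c hc
          simp [List.length_tail]
          omega)
        (Or.inr ⟨r0.tail, List.mem_map_of_mem hr0, by simp [List.length_tail, hr0len]⟩)]
      rw [List.append_assoc, List.singleton_append, List.range_succ_eq_map, List.map_cons]
      congr 2
      rw [List.map_map]
      apply List.map_congr_left
      intro j _
      simp only [Function.comp_apply, List.map_map]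
      apply List.map_congr_left
      intro c _
      simp only [Function.comp_apply]
      exact tail_getD c j
    · refine List.any_eq_true.mpr ⟨r0, hr0, ?_⟩
      cases r0 with
      | nil => simp at hr0len
      | cons a b => simp

-- ---------- stage-1 and stage-2 glue ----------

-- the two ragged stage-1 result lists coincide
lemma res_eq (arr : List (List Int)) (h : Pre_c_cal arr) :
    (PySem.List.pyRange 0 ((PySem.List.pyGetD arr 0 []).length : Int) 1).foldl
      (fun res i =>
        res ++ [(PySem.List.sorted2
            (PySem.Dict.counter ((PySem.List.pyRange 0 (arr.length : Int) 1).map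
              (fun j => PySem.List.pyGetD (PySem.List.pyGetD arr j []) i 0))).items
            (fun x => x.2) (fun x => x.1)).foldl
          (fun st p => if p.1 ≠ 0 then st ++ [p.1] ++ [p.2] else st) []]) []
    = (zipStar arr).foldl
      (fun res col =>
        res ++ [(PySem.List.sorted2
            (rleLoop (PySem.List.sorted col (fun x => x)) (((PySem.List.sorted col (fun x => x)).length : Int)) 0 [])
            (fun p => p.1) (fun p => p.2)).flatMap (fun p => [p.2, p.1])]) [] := by
  obtain ⟨hne, hh, hrows⟩ := h
  have hm0 : PySem.List.pyGetD arr 0 [] = arr.headI := by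
    rw [show ((0:Int)) = ((0:Nat):Int) by rfl, PySem.List.pyGetD_natCast]
    cases arr with
    | nil => simp at hne
    | cons r t => rfl
  rw [hm0]
  rw [PySem.List.foldl_append_singleton_eq_map, PySem.List.foldl_append_singleton_eq_map]
  rw [zipStar_eq arr.headI.length arr hne rfl hrows]
  rw [PySem.List.pyRange_zero_nat arr.headI.length]
  rw [List.map_map, List.map_map, List.nil_append, List.nil_append]
  apply List.map_congr_left
  intro i _
  simp only [Function.comp_apply]
  rw [colA_eq_col arr (i : Int)]
  simp only [PySem.List.pyGetD_natCast]
  rw [emit_eq, List.nil_append]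
  exact col_eq (arr.map (fun r => r.getD i 0))

-- padding + index transpose = head peeling, for any nonempty ragged list
lemma stage2_eq (R : List (List Int)) (hRne : R ≠ []) :
    reversing (zeroPadding R) = peel R [] := by
  obtain ⟨M, hmax⟩ : ∃ M, PySem.List.max? (R.map (fun r => (r.length : Int))) (fun x => x) = some M := by
    cases hM : PySem.List.max? (R.map (fun r => (r.length : Int))) (fun x => x) with
    | none =>
      exfalso
      rw [PySem.List.max?_eq_none_iff] at hM
      exact hRne (by simpa using hM)
    | some M => exact ⟨M, rfl⟩
  have hub : ∀ r ∈ R, (r.length : Int) ≤ M := by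
    intro r hr
    have := PySem.List.max?_isMax hmax ((r.length : Int)) (List.mem_map_of_mem hr)
    simpa using this
  obtain ⟨r0, hr0, hr0M⟩ : ∃ r ∈ R, ((r.length : Int)) = M := by
    have hmem := PySem.List.max?_mem hmax
    obtain ⟨r, hrm, hre⟩ := List.mem_map.mp hmem
    exact ⟨r, hrm, hre⟩
  have hM0 : 0 ≤ M := by omega
  rw [zeroPadding_eq R M hmax]
  set P := R.map (fun r => r ++ List.replicate (M - (r.length : Int)).toNat 0) with hPdef
  have hPne : P ≠ [] := by
    intro hp
    exact hRne (by simpa [hPdef] using hp)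
  have hPlen : ∀ r ∈ P, r.length = M.toNat := by
    intro r hr
    obtain ⟨q, hq, rfl⟩ := List.mem_map.mp hr
    have := hub q hq
    simp only [List.length_append, List.length_replicate]
    omega
  rw [reversing_eq P M.toNat hPne hPlen]
  rw [peel_spec M.toNat R []
    (by intro r hr; have := hub r hr; omega)
    (Or.inr ⟨r0, hr0, by omega⟩), List.nil_append]
  apply List.map_congr_left
  intro j hj
  have hjM : j < M.toNat := by simpa using hj
  rw [hPdef, List.map_map]
  apply List.map_congr_left
  intro r hr
  simp only [Function.comp_apply]
  have hrM := hub r hr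
  have hlenP : (r ++ List.replicate (M - (r.length : Int)).toNat 0).length = M.toNat := by
    simp only [List.length_append, List.length_replicate]
    omega
  have hj1 : j < (r ++ List.replicate (M - (r.length : Int)).toNat 0).length := by
    rw [hlenP]; exact hjM
  by_cases hjr : j < r.length
  · rw [List.getD_eq_getElem _ _ hj1, List.getD_eq_getElem _ _ hjr,
      List.getElem_append_left hjr]
  · rw [List.getD_eq_getElem _ _ hj1, List.getElem_append_right (by omega),
      List.getD_eq_default _ _ (by omega)]
    simp

-- ===== VERDICT (by name: the statement is the Claim_ definition above) =====
theorem c_cal_spec : Claim_equal_c_cal := by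
  intro arr _ hpre
  unfold Spec_c_cal
  obtain ⟨hne, hh, hrows⟩ := hpre
  simp only [c_cal, c_cal_alt]
  rw [res_eq arr ⟨hne, hh, hrows⟩]
  apply stage2_eq
  rw [PySem.List.foldl_append_singleton_eq_map, List.nil_append]
  rw [zipStar_eq arr.headI.length arr hne rfl hrows]
  intro hcontra
  have := congrArg List.length hcontra
  simp only [List.length_map, List.length_range, List.length_nil] at this
  exact hh (List.length_eq_zero_iff.mp this)
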